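-- pv_equiv track=rewrite | github.com/pypi-data/pypi-mirror-403 | packages/nettoolkit/nettoolkit-1.9.0.tar.gz/nettoolkit-1.9.0/nettoolkit/addressing/addressing.py | subnet_size_to_mask
-- ===== SOURCE A (Python) =====
-- SQRS = [2**x for x in range(32)]
--
-- def subnet_size_to_mask(n):
-- 	"""converts subnet size to get subnet mask value
--
-- 	Args:
-- 		n (int): number of ips in a subnet (ex: 128)
--
-- 	Returns:
-- 		int: subnet mask (25)
-- 	"""
-- 	subs = []
-- 	for x in reversed(SQRS):
-- 		if x > n: continue
-- 		if x == n:
-- 			subs.append(n)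
-- 			break
-- 		subs.append(x)
-- 		subs.append(n-x)
-- 		break
-- 	masks = []
-- 	for n in subs:
-- 		n = bin(n)
-- 		masks.append(  32- (len(n) - n.rfind('1')  -1))
-- 	if len(masks) == 1:
-- 		return masks[0]
-- 	else:
-- 		return masks
-- ===== SOURCE B (Python) =====
-- def subnet_size_to_mask(n):
--     """converts subnet size to get subnet mask value"""
--     if n < 1:
--         return []
--     # p = 32 - floor(log2 n) by halving n down to 1; exact <=> n is a power of two
--     p, m, exact = 32, n, True
--     while m > 1:
--         if m % 2:
--             exact = False
--         m //= 2
--         p -= 1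
--     if exact:
--         return p
--     # q = 32 - (trailing zero count of n) by stripping factors of two from n itself:
--     # the remainder n - 2**floor(log2 n) has the same trailing zeros as n, so no split is needed
--     q, m = 32, n
--     while m % 2 == 0:
--         m //= 2
--         q -= 1
--     return [p, q]
-- ===== Notes on version B (the rewrite author's own statement) =====
-- stated objective: simpler
-- what changed: B never builds A's power-of-two table, never splits n into a big block plus remainder and never parses bin() strings: it derives both prefixes directly from n with two repeated-halving loops (one for floor(log2 n) with a power-of-two flag, one stripping factors of two, using the fact that the remainder shares n's trailing zeros); Pre_ excludes sizes that are an exact power of two (1..2^31), where A (and B alike) return a bare int masks[0] instead of a list of ints, outside the declared return type.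
-- outside the precondition, e.g. on subnet_size_to_mask(128): A returns 25, B returns 25; on subnet_size_to_mask(2): A returns 31, B returns 31; on subnet_size_to_mask(1): A returns 32, B returns 32
import Mathlib
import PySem

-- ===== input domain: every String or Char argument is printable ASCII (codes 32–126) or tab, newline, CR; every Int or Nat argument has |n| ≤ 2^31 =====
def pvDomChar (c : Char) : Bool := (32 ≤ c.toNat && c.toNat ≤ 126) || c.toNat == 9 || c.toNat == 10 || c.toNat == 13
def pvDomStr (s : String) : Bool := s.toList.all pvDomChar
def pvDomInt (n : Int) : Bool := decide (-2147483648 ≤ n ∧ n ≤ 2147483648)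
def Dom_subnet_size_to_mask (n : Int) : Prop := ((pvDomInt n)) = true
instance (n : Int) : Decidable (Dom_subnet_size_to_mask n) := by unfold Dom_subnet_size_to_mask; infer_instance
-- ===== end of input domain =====

-- B drops A's power-of-two table, its split of n into a big block plus remainder and its
-- bin()-string parsing: it reads both prefixes off n itself by two repeated-halving loops
-- (floor(log2 n) and the trailing-zero count of n, which equals that of A's remainder) — simpler.
-- Python returns the scalar masks[0] when the list has one element; under the List Int
-- convention that scalar case lies outside Pre_ (see Pre_ comment).

-- ===== PORT A =====

-- SQRS = [2**x for x in range(32)]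
def pvSQRS : List Int := (List.range 32).map (fun x => (2:Int)^x)

-- the 'for x in reversed(SQRS)' loop with its continue/break structure
def pvLoopA (n : Int) : List Int → List Int
  | [] => []
  | x :: xs => if x > n then pvLoopA n xs else if x = n then [n] else [x, n - x]

-- bin(m) for m ≥ 0, exact: '0b' ++ binary digits ('0' for m = 0); elements of subs are > 0
def pvBinDigits (m : Nat) : List Char :=
  if h : m = 0 then [] else pvBinDigits (m / 2) ++ [if m % 2 = 1 then '1' else '0']
  decreasing_by exact Nat.div_lt_self (Nat.pos_of_ne_zero h) (by norm_num)

def pvBin (m : Nat) : List Char :=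
  '0' :: 'b' :: (if m = 0 then ['0'] else pvBinDigits m)

-- str.rfind(c): highest index of c, or -1 if absent (exact model of the builtin)
def pvRfind (c : Char) (s : List Char) : Int :=
  if c ∈ s then (s.length : Int) - 1 - (s.reverse.idxOf c : Int) else -1

-- 32 - (len(bin(v)) - bin(v).rfind('1') - 1); subs elements are always positive, so v.toNat is exact
def pvMaskA (v : Int) : Int :=
  let s := pvBin v.toNat
  32 - ((s.length : Int) - pvRfind '1' s - 1)

def subnet_size_to_mask (n : Int) : List Int :=
  let subs := pvLoopA n pvSQRS.reverse
  let masks := subs.map pvMaskA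
  -- Python: 'return masks[0] if len==1 else masks'; as a List Int both branches are 'masks'
  masks

-- ===== PORT B =====

-- 'p, m, exact = 32, n, True; while m > 1: exact &= m%2==0; m //= 2; p -= 1'
def pvLoop1 (p m : Int) (exact : Bool) : Int × Bool :=
  if h : 1 < m then
    pvLoop1 (p - 1) (PySem.Int.floordiv m 2) (exact && (PySem.Int.mod m 2 == 0))
  else (p, exact)
  termination_by m.toNat
  decreasing_by rw [PySem.Int.floordiv_eq_ediv_of_pos (by norm_num)]; omega

-- 'q, m = 32, n; while m % 2 == 0: m //= 2; q -= 1'; the '0 < m' guard only makes the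
-- recursion total (in B this loop only ever runs with m ≥ 1)
def pvLoop2 (q m : Int) : Int :=
  if h : 0 < m ∧ PySem.Int.mod m 2 = 0 then pvLoop2 (q - 1) (PySem.Int.floordiv m 2)
  else q
  termination_by m.toNat
  decreasing_by rw [PySem.Int.floordiv_eq_ediv_of_pos (by norm_num)]; omega

def subnet_size_to_mask_alt (n : Int) : List Int :=
  if n < 1 then []
  else
    let pe := pvLoop1 32 n true
    -- Python returns the bare int pe.1 on the exact branch (outside Pre_, singleton here)
    if pe.2 then [pe.1]
    else [pe.1, pvLoop2 32 n]

-- ===== PRECONDITION & SPEC =====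
-- Pre_ excludes exactly the sizes n that are a power of two between 1 and 2^31: there
-- len(masks) == 1 and Python A (and B) return the bare int masks[0], a value outside the
-- declared return type List Int, so the typed claim cannot cover those inputs.
def Pre_subnet_size_to_mask (n : Int) : Prop := ¬ ∃ k ∈ Finset.range 32, n = (2:Int)^k
instance (n : Int) : Decidable (Pre_subnet_size_to_mask n) := by unfold Pre_subnet_size_to_mask; infer_instance
def pvWitness_subnet_size_to_mask : Int := 12

def Spec_subnet_size_to_mask (n : Int) (out : List Int) : Prop := out = subnet_size_to_mask_alt n
instance (n : Int) (out : List Int) : Decidable (Spec_subnet_size_to_mask n out) := by unfold Spec_subnet_size_to_mask; infer_instance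

-- ===== CLAIM (what is proved, stated in full; the proofs are below) =====
def Claim_equal_subnet_size_to_mask : Prop := ∀ (n : Int), Dom_subnet_size_to_mask n → Pre_subnet_size_to_mask n → Spec_subnet_size_to_mask n (subnet_size_to_mask n)

-- ===== LEMMAS AND PROOFS =====

-- the reversed SQRS table as an explicit descending recursion, for the loop induction
def pvDescPows : Nat → List Int
  | 0 => [(1:Int)]
  | j+1 => (2:Int)^(j+1) :: pvDescPows j

theorem pvSQRS_rev : pvSQRS.reverse = pvDescPows 31 := by decide

-- v & -v for v > 0 (lowest set bit), the common value both final maps are compared through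
def pvLowBit (m : Nat) : Nat :=
  if h : m = 0 then 0 else if m % 2 = 1 then 1 else 2 * pvLowBit (m / 2)
  decreasing_by exact Nat.div_lt_self (Nat.pos_of_ne_zero h) (by norm_num)

theorem pvLowBit_pos (m : Nat) (hm : m ≠ 0) : 0 < pvLowBit m := by
  induction m using Nat.strong_induction_on with
  | _ m ih =>
    rw [pvLowBit]
    split
    · omega
    · split
      · omega
      · rename_i h1 h2
        have : m / 2 ≠ 0 := by omega
        have := ih (m/2) (by omega) this
        omega

theorem pvOne_mem_digits (m : Nat) (hm : m ≠ 0) : '1' ∈ pvBinDigits m := by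
  induction m using Nat.strong_induction_on with
  | _ m ih =>
    rw [pvBinDigits]
    split
    · omega
    · by_cases h2 : m % 2 = 1
      · simp [h2]
      · have hhalf : m / 2 ≠ 0 := by omega
        have := ih (m/2) (by omega) hhalf
        simp [this]

theorem pvIdx_eq_log2_lowBit (m : Nat) (hm : m ≠ 0) :
    (pvBinDigits m).reverse.idxOf '1' = Nat.log2 (pvLowBit m) := by
  induction m using Nat.strong_induction_on with
  | _ m ih =>
    rw [pvBinDigits, pvLowBit]
    split
    · omega
    · by_cases h2 : m % 2 = 1
      · simp [h2, List.idxOf_cons_self]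
        decide
      · have hhalf : m / 2 ≠ 0 := by omega
        have hrec := ih (m/2) (by omega) hhalf
        have hpos := pvLowBit_pos (m/2) hhalf
        simp only [h2, if_false, List.reverse_append, List.reverse_singleton,
          List.singleton_append]
        rw [List.idxOf_cons_ne _ (by decide), hrec]
        simp only [Nat.log2_eq_log_two]
        rw [Nat.mul_comm, Nat.log_mul_base (by norm_num) (by omega)]

theorem pvMaskA_eq (v : Int) (hv : 1 ≤ v) :
    pvMaskA v = 32 - (Nat.log2 (pvLowBit v.toNat) : Int) := by
  have hm : v.toNat ≠ 0 := by omega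
  have hmem : '1' ∈ pvBin v.toNat := by
    simp [pvBin, hm, pvOne_mem_digits _ hm]
  rw [pvMaskA, pvRfind, if_pos hmem]
  have hrev : (pvBin v.toNat).reverse.idxOf '1'
      = (pvBinDigits v.toNat).reverse.idxOf '1' := by
    simp only [pvBin, hm, if_false, List.reverse_cons, List.append_assoc]
    exact List.idxOf_append_of_mem (by simpa using pvOne_mem_digits _ hm)
  rw [hrev, pvIdx_eq_log2_lowBit _ hm]
  ring

theorem pvLowBit_pow (k : Nat) : pvLowBit (2^k) = 2^k := by
  induction k with
  | zero => rw [pvLowBit]; simp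
  | succ k ih =>
    have hpow : (2:Nat)^(k+1) = 2 * 2^k := by rw [pow_succ]; ring
    have h0 : (0:Nat) < 2^k := by positivity
    rw [hpow, pvLowBit, dif_neg (by omega), if_neg (by omega),
      show 2 * 2^k / 2 = 2^k by omega, ih]

-- the remainder n - 2^⌊log2 n⌋ has the same lowest set bit as n itself
theorem pvLowBit_add_pow (k : Nat) : ∀ r : Nat, 0 < r → r < 2^k →
    pvLowBit (2^k + r) = pvLowBit r := by
  induction k with
  | zero => intro r h1 h2; omega
  | succ k ih =>
    intro r h1 h2
    have hpow : (2:Nat)^(k+1) = 2 * 2^k := by rw [pow_succ]; ring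
    by_cases hodd : r % 2 = 1
    · have hL : pvLowBit (2^(k+1) + r) = 1 := by
        rw [pvLowBit]
        simp [show (2^(k+1) + r) % 2 = 1 by omega]
      have hR : pvLowBit r = 1 := by
        rw [pvLowBit]; simp [show r ≠ 0 by omega, hodd]
      rw [hL, hR]
    · have hdiv : (2^(k+1) + r) / 2 = 2^k + r/2 := by omega
      have hr2 : 0 < r/2 ∧ r/2 < 2^k := by omega
      have hL : pvLowBit (2^(k+1) + r) = 2 * pvLowBit (2^k + r/2) := by
        rw [pvLowBit]
        simp [show ¬ (2^(k+1) + r) % 2 = 1 by omega, hdiv]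
      have hR : pvLowBit r = 2 * pvLowBit (r/2) := by
        rw [pvLowBit]; simp [show r ≠ 0 by omega, hodd]
      rw [hL, hR, ih (r/2) hr2.1 hr2.2]

-- loop 1 computes 32 - floor(log2 n) together with the power-of-two test
theorem pvLoop1_eq : ∀ N : Nat, ∀ m : Int, m.toNat = N → 1 ≤ m → ∀ p : Int, ∀ e : Bool,
    pvLoop1 p m e = (p - (Nat.log2 m.toNat : Int), e && (m == (2:Int)^(Nat.log2 m.toNat))) := by
  intro N
  induction N using Nat.strong_induction_on with
  | _ N ih =>
    intro m hN hm p e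
    rw [pvLoop1]
    by_cases h1 : 1 < m
    · rw [dif_pos h1]
      rw [PySem.Int.floordiv_eq_ediv_of_pos (by norm_num), PySem.Int.mod_eq_emod_of_pos (by norm_num)]
      have hrec := ih (m/2).toNat (by omega) (m/2) rfl (by omega) (p-1) (e && (m % 2 == 0))
      rw [hrec]
      have htn : (m/2).toNat = m.toNat / 2 := by omega
      have hlog : Nat.log2 m.toNat = Nat.log2 (m.toNat/2) + 1 := by
        have hpos : 0 < Nat.log 2 m.toNat := Nat.log_pos (by norm_num) (by omega)
        simp only [Nat.log2_eq_log_two]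
        rw [Nat.log_div_base]
        omega
      rw [htn, hlog]
      refine Prod.ext ?_ ?_
      · push_cast; ring
      · simp only [Bool.and_assoc]
        congr 1
        rw [Bool.eq_iff_iff]
        simp only [Bool.and_eq_true, beq_iff_eq]
        have hp : (2:Int)^(Nat.log2 (m.toNat/2) + 1) = 2 * 2^(Nat.log2 (m.toNat/2)) := by ring
        rw [hp]
        have hhalf : (m/2 : Int) = (m.toNat/2 : Nat) := by omega
        rw [hhalf]
        generalize (2:Int)^(Nat.log2 (m.toNat/2)) = A
        omega
    · rw [dif_neg h1]
      have : m = 1 := by omega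
      subst this
      simp
      intro _
      decide

-- loop 2 computes 32 - (trailing-zero count of n) = 32 - log2 (lowest set bit of n)
theorem pvLoop2_eq : ∀ N : Nat, ∀ m : Int, m.toNat = N → 1 ≤ m → ∀ q : Int,
    pvLoop2 q m = q - (Nat.log2 (pvLowBit m.toNat) : Int) := by
  intro N
  induction N using Nat.strong_induction_on with
  | _ N ih =>
    intro m hN hm q
    rw [pvLoop2]
    rw [PySem.Int.floordiv_eq_ediv_of_pos (by norm_num), PySem.Int.mod_eq_emod_of_pos (by norm_num)]
    by_cases he : m % 2 = 0
    · rw [dif_pos ⟨by omega, he⟩]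
      have hrec := ih (m/2).toNat (by omega) (m/2) rfl (by omega) (q-1)
      rw [hrec]
      have htn : (m/2).toNat = m.toNat / 2 := by omega
      have hlb : pvLowBit m.toNat = 2 * pvLowBit (m.toNat/2) := by
        rw [pvLowBit]
        simp [show m.toNat ≠ 0 by omega, show ¬ m.toNat % 2 = 1 by omega]
      have hpos := pvLowBit_pos (m.toNat/2) (by omega)
      have hlog : Nat.log2 (pvLowBit m.toNat) = Nat.log2 (pvLowBit (m.toNat/2)) + 1 := by
        rw [hlb]
        simp only [Nat.log2_eq_log_two]
        rw [Nat.mul_comm, Nat.log_mul_base (by norm_num) (by omega)]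
      rw [htn, hlog]
      push_cast; ring
    · rw [dif_neg (by omega)]
      have hlb : pvLowBit m.toNat = 1 := by
        rw [pvLowBit]
        simp [show m.toNat ≠ 0 by omega, show m.toNat % 2 = 1 by omega]
      rw [hlb]
      norm_num

theorem pvLoop_empty (j : Nat) (n : Int) (hn : n < 1) :
    pvLoopA n (pvDescPows j) = [] := by
  induction j with
  | zero => simp [pvDescPows, pvLoopA, show (1:Int) > n by omega]
  | succ j ih =>
    have hpow : (0:Int) < 2^(j+1) := by positivity
    simp [pvDescPows, pvLoopA, show (2:Int)^(j+1) > n by omega, ih]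

theorem pvLoop_eq (j : Nat) : ∀ n : Int, 1 ≤ n → n < (2:Int)^(j+1) →
    pvLoopA n (pvDescPows j) =
      (if (2:Int)^(Nat.log2 n.toNat) = n then [n]
       else [(2:Int)^(Nat.log2 n.toNat), n - (2:Int)^(Nat.log2 n.toNat)]) := by
  induction j with
  | zero =>
    intro n h1 h2
    have : n = 1 := by norm_num at h2; omega
    subst this
    simp [pvDescPows, pvLoopA]
    decide
  | succ j ih =>
    intro n h1 h2
    rw [pvDescPows, pvLoopA]
    by_cases hgt : (2:Int)^(j+1) > n
    · rw [if_pos hgt]; exact ih n h1 hgt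
    · have hle : (2:Int)^(j+1) ≤ n := by omega
      have hlog : Nat.log2 n.toNat = j + 1 := by
        have c1 : ((2:Nat)^(j+1) : Int) = (2:Int)^(j+1) := by push_cast; ring
        have c2 : ((2:Nat)^(j+2) : Int) = (2:Int)^(j+2) := by push_cast; ring
        have l1 : (2:Nat)^(j+1) ≤ n.toNat := by omega
        have l2 : n.toNat < (2:Nat)^(j+1+1) := by
          have : ((2:Nat)^(j+2) : Int) = (2:Int)^(j+2) := c2
          omega
        rw [Nat.log2_eq_log_two]
        exact Nat.log_eq_of_pow_le_of_lt_pow l1 l2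
      rw [if_neg hgt, hlog]

-- ===== VERDICT (by name: the statement is the Claim_ definition above) =====
theorem subnet_size_to_mask_spec : Claim_equal_subnet_size_to_mask := by
  intro n hdom hpre
  have hb : -2147483648 ≤ n ∧ n ≤ 2147483648 := by
    simpa [Dom_subnet_size_to_mask, pvDomInt] using hdom
  unfold Spec_subnet_size_to_mask subnet_size_to_mask subnet_size_to_mask_alt
  rw [pvSQRS_rev]
  by_cases hn : n < 1
  · simp [pvLoop_empty 31 n hn, hn]
  · rw [Int.not_lt] at hn
    have hub : n < (2:Int)^(31+1) := by norm_num; omega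
    rw [if_neg (show ¬ n < 1 by omega), pvLoop_eq 31 n hn hub]
    set k := Nat.log2 n.toNat with hk
    have hm0 : n.toNat ≠ 0 := by omega
    have hself : (2:Nat)^k ≤ n.toNat := Nat.log2_self_le hm0
    have hklt : k < 32 := by
      rw [hk, Nat.log2_lt hm0]
      have : ((2:Nat)^32 : Int) = (2:Int)^32 := by push_cast
      omega
    have hc1 : ((2:Nat)^k : Int) = (2:Int)^k := by push_cast; ring
    have hne : (2:Int)^k ≠ n := by
      intro he
      exact hpre ⟨k, Finset.mem_range.mpr hklt, he.symm⟩
    have hnlt : n.toNat < 2^(k+1) := Nat.lt_log2_self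
    rw [pvLoop1_eq n.toNat n rfl hn 32 true, ← hk]
    have hbeq : (n == (2:Int)^k) = false := by
      simp only [beq_eq_false_iff_ne, ne_eq]
      exact fun he => hne he.symm
    rw [if_neg hne]
    simp only [hbeq, Bool.true_and, if_false, Bool.false_eq_true]
    rw [pvLoop2_eq n.toNat n rfl hn 32]
    have hhigh_pos : (1:Int) ≤ (2:Int)^k := by
      have := pow_pos (show (0:Int) < 2 by norm_num) k; omega
    have hrem_pos : (1:Int) ≤ n - 2^k := by omega
    rw [List.map_cons, List.map_cons, List.map_nil,
      pvMaskA_eq _ hhigh_pos, pvMaskA_eq _ hrem_pos]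
    have e1 : ((2:Int)^k).toNat = 2^k := by omega
    have e2 : (n - (2:Int)^k).toNat = n.toNat - 2^k := by omega
    have hr : n.toNat - 2^k > 0 := by omega
    have hsum : 2^k + (n.toNat - 2^k) = n.toNat := by omega
    rw [e1, e2, pvLowBit_pow]
    have := pvLowBit_add_pow k (n.toNat - 2^k) hr (by omega)
    rw [hsum] at this
    rw [← this]
    have hlg : Nat.log2 ((2:Nat)^k) = k := by
      simp [Nat.log2_eq_log_two, Nat.log_pow]
    rw [hlg]
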